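-- pv_equiv track=rewrite | github.com/vik061/VictorsRandomTriviaSurvivalGame | game.py | make_hard_board_coordinates
-- ===== SOURCE A (Python) =====
-- def make_hard_board_coordinates(rows: int, columns: int) -> dict[tuple[int, int], str]:
--     """
--     Make the hard board coordinates for the game board.
--
--     :param rows: an integer
--     :param columns: an integer
--     :precondition: rows and columns are positive non-zero integers
--     :postcondition: make the hard board coordinates
--     :return: a dictionary with the tuple of (row, coordinate) as the key and a string level description as the value
--
--     >>> rows_5 = 5
--     >>> columns_5 = 5
--     >>> make_hard_board_coordinates(rows_5, columns_5)
--     {(0, 4): 'Hard', (1, 4): 'Hard', (2, 4): 'Hard', (3, 3): 'Hard', (4, 2): 'Hard'}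
--     """
--     hard_board_dictionary = {}
--
--     for row_coordinate in range(rows):
--         for column_coordinate in range(columns):
--             if (row_coordinate <= 2 and column_coordinate == 4) \
--                     or (row_coordinate == 3 and column_coordinate == 3) \
--                     or (row_coordinate == 4 and column_coordinate == 2):
--                 hard_board_dictionary[(row_coordinate, column_coordinate)] = "Hard"
--     return hard_board_dictionary
-- ===== SOURCE B (Python) =====
-- _HARD_CELLS = [(0, 4), (1, 4), (2, 4), (3, 3), (4, 2)]
--
--
-- def make_hard_board_coordinates(rows: int, columns: int) -> dict[tuple[int, int], str]:
--     return {(r, c): "Hard" for r, c in _HARD_CELLS if r < rows and c < columns}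
-- ===== Notes on version B (the rewrite author's own statement) =====
-- stated objective: faster
-- what changed: B emits the five fixed 'Hard' cells directly, filtered by the board bounds, instead of scanning every (row, column) cell of the board.
import Mathlib
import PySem

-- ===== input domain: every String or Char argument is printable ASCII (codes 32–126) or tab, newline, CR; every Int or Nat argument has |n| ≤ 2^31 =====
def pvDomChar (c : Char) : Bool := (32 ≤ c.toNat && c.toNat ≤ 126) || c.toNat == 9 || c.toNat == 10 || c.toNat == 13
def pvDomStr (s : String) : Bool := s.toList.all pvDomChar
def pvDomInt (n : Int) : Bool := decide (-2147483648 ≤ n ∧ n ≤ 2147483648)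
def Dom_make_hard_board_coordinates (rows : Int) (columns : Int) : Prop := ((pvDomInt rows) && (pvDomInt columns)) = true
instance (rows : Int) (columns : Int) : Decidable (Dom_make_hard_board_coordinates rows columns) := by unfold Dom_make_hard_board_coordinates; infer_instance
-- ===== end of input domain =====

-- B replaces A's full row-by-column board scan by directly emitting the five fixed 'Hard'
-- cells filtered by the board bounds (objective: faster, asymptotic O(rows*columns) → O(1)).

-- ===== PORT A =====
-- inner 'for column_coordinate in range(columns)' loop of A
def pvInnerA (columns : Int) (r : Int) (d : PySem.Dict (Int × Int) String) : PySem.Dict (Int × Int) String :=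
  (PySem.List.pyRange 0 columns 1).foldl
    (fun d c =>
      if (r ≤ 2 ∧ c = 4) ∨ (r = 3 ∧ c = 3) ∨ (r = 4 ∧ c = 2)
      then d.insert (r, c) "Hard" else d) d

def make_hard_board_coordinates (rows : Int) (columns : Int) : List (Int × Int × String) :=
  (((PySem.List.pyRange 0 rows 1).foldl (fun d r => pvInnerA columns r d)
      (PySem.Dict.empty : PySem.Dict (Int × Int) String)).items).map
    (fun kv => (kv.1.1, kv.1.2, kv.2))

-- ===== PORT B =====
def pvHardCells : List (Int × Int) := [(0, 4), (1, 4), (2, 4), (3, 3), (4, 2)]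

def make_hard_board_coordinates_alt (rows : Int) (columns : Int) : List (Int × Int × String) :=
  (pvHardCells.filter (fun rc => decide (rc.1 < rows) && decide (rc.2 < columns))).map
    (fun rc => (rc.1, rc.2, "Hard"))

-- ===== PRECONDITION & SPEC =====
def Spec_make_hard_board_coordinates (rows : Int) (columns : Int) (out : List (Int × Int × String)) : Prop := out = make_hard_board_coordinates_alt rows columns
instance (rows : Int) (columns : Int) (out : List (Int × Int × String)) : Decidable (Spec_make_hard_board_coordinates rows columns out) := by unfold Spec_make_hard_board_coordinates; infer_instance

-- ===== CLAIM (what is proved, stated in full; the proofs are below) =====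
def Claim_equal_make_hard_board_coordinates : Prop := ∀ (rows : Int) (columns : Int), Dom_make_hard_board_coordinates rows columns → Spec_make_hard_board_coordinates rows columns (make_hard_board_coordinates rows columns)

-- ===== LEMMAS AND PROOFS =====

-- a fold whose step never changes the accumulator is the identity
lemma pv_foldl_id {α β : Type} {l : List β} {f : α → β → α}
    (h : ∀ a x, x ∈ l → f a x = a) : ∀ d : α, l.foldl f d = d := by
  induction l with
  | nil => intro d; rfl
  | cons x t ih =>
    intro d
    rw [List.foldl_cons, h d x (List.mem_cons_self), ih (fun a y hy => h a y (List.mem_cons_of_mem _ hy))]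

-- for r ≥ 5 no cell in row r is marked: the inner loop is the identity
lemma pvInnerA_id (columns r : Int) (hr : 5 ≤ r) (d : PySem.Dict (Int × Int) String) :
    pvInnerA columns r d = d := by
  apply pv_foldl_id
  intro a c _
  exact if_neg (by omega)

-- the inner loop only looks at columns through min/max clamping to [0, 5]
lemma pvInnerA_clamp (columns r : Int) (d : PySem.Dict (Int × Int) String) :
    pvInnerA columns r d = pvInnerA (max 0 (min columns 5)) r d := by
  rcases (by omega : columns ≤ 0 ∨ 0 < columns) with h | h
  · have hc : max 0 (min columns 5) = 0 := by omega
    rw [hc]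
    unfold pvInnerA
    rw [PySem.List.pyRange_one_eq_nil h, PySem.List.pyRange_one_eq_nil (by omega)]
  · rcases (by omega : columns ≤ 5 ∨ 5 < columns) with h5 | h5
    · have hc : max 0 (min columns 5) = columns := by omega
      rw [hc]
    · have hc : max 0 (min columns 5) = 5 := by omega
      rw [hc]
      unfold pvInnerA
      rw [PySem.List.pyRange_one_append 0 5 columns (by norm_num) (by omega), List.foldl_append]
      apply pv_foldl_id
      intro a c hc5
      have : (5 : Int) ≤ c := (PySem.List.mem_pyRange_one.mp hc5).1
      exact if_neg (by omega)

-- A only looks at its arguments through clamping to [0, 5]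
lemma pvA_clamp (rows columns : Int) :
    make_hard_board_coordinates rows columns
      = make_hard_board_coordinates (max 0 (min rows 5)) (max 0 (min columns 5)) := by
  unfold make_hard_board_coordinates
  have hf : (fun (d : PySem.Dict (Int × Int) String) (r : Int) => pvInnerA columns r d)
      = (fun d r => pvInnerA (max 0 (min columns 5)) r d) :=
    funext fun d => funext fun r => pvInnerA_clamp columns r d
  rw [hf]
  rcases (by omega : rows ≤ 0 ∨ 0 < rows) with h | h
  · have hr : max 0 (min rows 5) = 0 := by omega
    rw [hr, PySem.List.pyRange_one_eq_nil h, PySem.List.pyRange_one_eq_nil (by omega)]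
  · rcases (by omega : rows ≤ 5 ∨ 5 < rows) with h5 | h5
    · have hr : max 0 (min rows 5) = rows := by omega
      rw [hr]
    · have hr : max 0 (min rows 5) = 5 := by omega
      rw [hr, PySem.List.pyRange_one_append 0 5 rows (by norm_num) (by omega), List.foldl_append]
      have hid : ∀ d : PySem.Dict (Int × Int) String,
          (PySem.List.pyRange 5 rows 1).foldl (fun d r => pvInnerA (max 0 (min columns 5)) r d) d = d :=
        pv_foldl_id (fun d r hr5 =>
          pvInnerA_id _ r (PySem.List.mem_pyRange_one.mp hr5).1 d)
      rw [hid]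

-- B only looks at its arguments through clamping to [0, 5]
lemma pvB_clamp (rows columns : Int) :
    make_hard_board_coordinates_alt rows columns
      = make_hard_board_coordinates_alt (max 0 (min rows 5)) (max 0 (min columns 5)) := by
  unfold make_hard_board_coordinates_alt
  refine congrArg _ (List.filter_congr ?_)
  intro rc hrc
  fin_cases hrc <;>
    · show (decide _ && decide _) = (decide _ && decide _)
      congr 1 <;> (rw [decide_eq_decide]; omega)

-- ===== VERDICT (by name: the statement is the Claim_ definition above) =====
theorem make_hard_board_coordinates_spec : Claim_equal_make_hard_board_coordinates := by
  intro rows columns _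
  unfold Spec_make_hard_board_coordinates
  rw [pvA_clamp rows columns, pvB_clamp rows columns]
  have ha : 0 ≤ max 0 (min rows 5) ∧ max 0 (min rows 5) ≤ 5 := by omega
  have hb : 0 ≤ max 0 (min columns 5) ∧ max 0 (min columns 5) ≤ 5 := by omega
  obtain ⟨ha1, ha2⟩ := ha
  obtain ⟨hb1, hb2⟩ := hb
  set a := max 0 (min rows 5) with hA
  set b := max 0 (min columns 5) with hB
  clear_value a b
  interval_cases a <;> interval_cases b <;> decide
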